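-- pv_equiv track=rewrite | github.com/zhoubing512/note_mine | python/cmsc/geo_tools.py | _geo_neighbors_search
-- ===== SOURCE A (Python) =====
-- def _geo_neighbors_search(geo_code: str, direction: int):
--     """
--     按direction的方向搜索邻接位置编码。
--     :param geo_code: str，位置编码；
--     :param direction: int，方向，[0, 1, 2, 3] 对应 [上, 右, 下, 左]；
--     :return: str，相邻位置的编码。
--     """
--     if geo_code.strip() == "": return ""
--
--     HEXSTRING = "0123456789ABCDEF"
--     NEIGHBORS = ["238967CDAB01EF45", "143650729CBED8FA", "AB01EF45238967CD", "50721436D8FA9CBE"]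
--     BORDERS = ["ABEF", "57DF", "0145", "028A"]
--     last_char = geo_code[-1]
--     geo_base = geo_code[0: -1]
--     # 如果在边界上，则base同样需要进行邻接查找
--     if last_char in BORDERS[direction]:
--         geo_base = _geo_neighbors_search(geo_base, direction)
--     # 如果最后geocode只有一位了，且在边界上，则说明没有对应的邻接格子；或者如果返回的strBase为空字符串，则说明第一位都没有找到，则也没有邻接的格子
--     if (last_char in BORDERS[direction] and len(geo_code) == 1) \
--             or (len(geo_code) != 1 and geo_base == ""):
--         return ""
--     else:
--         return geo_base + NEIGHBORS[direction][HEXSTRING.index(last_char)]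
-- ===== SOURCE B (Python) =====
-- def _geo_neighbors_search(geo_code: str, direction: int):
--     """Iterative version: strip trailing border chars right-to-left, then rewrite the suffix."""
--     if geo_code.strip() == "":
--         return ""
--     HEXSTRING = "0123456789ABCDEF"
--     NEIGHBORS = ["238967CDAB01EF45", "143650729CBED8FA", "AB01EF45238967CD", "50721436D8FA9CBE"]
--     BORDERS = ["ABEF", "57DF", "0145", "028A"]
--     border = BORDERS[direction]
--     j = len(geo_code) - 1
--     while j >= 0 and geo_code[j] in border:
--         j -= 1
--     # every char at/right of j+1 is a border char; if what is left is blank, no neighbor exists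
--     if geo_code[:j + 1].strip() == "":
--         return ""
--     table = NEIGHBORS[direction]
--     return geo_code[:j] + "".join(table[HEXSTRING.index(c)] for c in geo_code[j:])
-- ===== Notes on version B (the rewrite author's own statement) =====
-- stated objective: simpler
-- what changed: Replaces A's tail-recursive borrow propagation (one recursive call per trailing border character, each re-running strip and rebuilding the string) with a single right-to-left scan that finds the end of the trailing border run and one pass that maps the whole suffix through the neighbor table.
-- outside the precondition, e.g. on _geo_neighbors_search('Z', 0): A raises ValueError, B raises ValueError; on _geo_neighbors_search('0', 9): A raises IndexError, B raises IndexError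
import Mathlib
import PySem

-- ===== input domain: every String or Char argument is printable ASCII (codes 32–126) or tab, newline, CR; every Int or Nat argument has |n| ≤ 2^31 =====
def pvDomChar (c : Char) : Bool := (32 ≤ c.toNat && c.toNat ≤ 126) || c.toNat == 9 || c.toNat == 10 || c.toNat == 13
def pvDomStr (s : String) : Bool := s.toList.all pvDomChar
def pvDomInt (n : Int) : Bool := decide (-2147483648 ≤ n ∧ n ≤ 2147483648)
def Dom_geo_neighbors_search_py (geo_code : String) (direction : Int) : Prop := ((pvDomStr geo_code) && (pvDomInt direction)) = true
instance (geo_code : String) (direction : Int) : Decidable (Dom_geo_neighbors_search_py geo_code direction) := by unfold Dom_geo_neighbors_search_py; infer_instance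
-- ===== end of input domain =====

-- B replaces A's right-to-left recursion by a single explicit scan (strip the trailing
-- border chars, then rewrite the suffix in one map); objective: simpler.

-- shared constant tables (the same literals both Pythons embed)
def pvHex : List Char := "0123456789ABCDEF".toList
def pvNeighbors : List (List Char) :=
  ["238967CDAB01EF45".toList, "143650729CBED8FA".toList, "AB01EF45238967CD".toList, "50721436D8FA9CBE".toList]
def pvBorders : List (List Char) := ["ABEF".toList, "57DF".toList, "0145".toList, "028A".toList]
-- BORDERS[direction] (Python negative indexing; default [] is never reached under Pre_)
def pvBd (d : Int) : List Char := (PySem.List.pyGet? pvBorders d).getD []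
-- NEIGHBORS[direction][HEXSTRING.index(c)] (defaults are never reached under Pre_)
def pvNb (d : Int) (c : Char) : Char := ((PySem.List.pyGet? pvNeighbors d).getD []).getD (pvHex.idxOf c) '?'

-- ===== PORT A =====
-- literal port of A's recursion (geo_code[-1] / geo_code[0:-1] of a non-blank string)
def pvGeoA (d : Int) (cs : List Char) : List Char :=
  if h : PySem.Chars.strip cs = [] then []
  else
    let last_char := cs.getLastD ' '
    let geo_base := cs.dropLast
    let geo_base2 := if last_char ∈ pvBd d then pvGeoA d geo_base else geo_base
    if (last_char ∈ pvBd d ∧ cs.length = 1) ∨ (cs.length ≠ 1 ∧ geo_base2 = []) then []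
    else geo_base2 ++ [pvNb d last_char]
termination_by cs.length
decreasing_by
  cases cs with
  | nil => simp [PySem.Chars.strip, PySem.Chars.lstrip, PySem.Chars.rstrip] at h
  | cons a t => simp [List.length_dropLast]

def geo_neighbors_search_py (geo_code : String) (direction : Int) : String :=
  String.mk (pvGeoA direction geo_code.toList)

-- ===== PORT B =====
-- literal port of Source B: the while loop from the right is the takeWhile/dropWhile of the reversed list
def pvGeoB (d : Int) (cs : List Char) : List Char :=
  if PySem.Chars.strip cs = [] then []
  else
    let bords := cs.reverse.takeWhile (· ∈ pvBd d)
    let rest := cs.reverse.dropWhile (· ∈ pvBd d)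
    if PySem.Chars.strip rest.reverse = [] then []
    else
      match rest with
      | [] => []  -- unreachable: strip [] = []
      | c :: pre => pre.reverse ++ (c :: bords.reverse).map (pvNb d)

def geo_neighbors_search_py_alt (geo_code : String) (direction : Int) : String :=
  String.mk (pvGeoB direction geo_code.toList)

-- ===== PRECONDITION & SPEC =====
-- Pre_ excludes exactly the inputs where Python A raises: an out-of-range direction
-- (IndexError) on a non-blank code, or a rightmost non-border character that is not an
-- uppercase hex digit while the part left of the trailing border run is not all blank
-- (ValueError from HEXSTRING.index).
def Pre_geo_neighbors_search_py (geo_code : String) (direction : Int) : Prop :=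
  PySem.Str.strip geo_code = "" ∨
  (-4 ≤ direction ∧ direction ≤ 3 ∧
    (PySem.Chars.strip ((geo_code.toList.reverse.dropWhile (· ∈ pvBd direction)).reverse) = [] ∨
     (geo_code.toList.reverse.dropWhile (· ∈ pvBd direction)).headD ' ' ∈ pvHex))
instance (geo_code : String) (direction : Int) : Decidable (Pre_geo_neighbors_search_py geo_code direction) := by
  unfold Pre_geo_neighbors_search_py; infer_instance

def pvWitness_geo_neighbors_search_py : String × Int := ("E9", 0)

def Spec_geo_neighbors_search_py (geo_code : String) (direction : Int) (out : String) : Prop := out = geo_neighbors_search_py_alt geo_code direction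
instance (geo_code : String) (direction : Int) (out : String) : Decidable (Spec_geo_neighbors_search_py geo_code direction out) := by unfold Spec_geo_neighbors_search_py; infer_instance

-- ===== CLAIM (what is proved, stated in full; the proofs are below) =====
def Claim_equal_geo_neighbors_search_py : Prop := ∀ (geo_code : String) (direction : Int), Dom_geo_neighbors_search_py geo_code direction → Pre_geo_neighbors_search_py geo_code direction → Spec_geo_neighbors_search_py geo_code direction (geo_neighbors_search_py geo_code direction)

-- ===== LEMMAS AND PROOFS =====

lemma pv_all_dropWhile {p : Char → Bool} (l : List Char) :
    (∀ c ∈ l.dropWhile p, p c = true) ↔ (∀ c ∈ l, p c = true) := by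
  induction l with
  | nil => simp
  | cons a t ih => by_cases h : p a = true <;> simp [h, ih]

lemma pv_strip_nil_iff (l : List Char) :
    PySem.Chars.strip l = [] ↔ ∀ c ∈ l, PySem.Chars.isspace c = true := by
  unfold PySem.Chars.strip PySem.Chars.rstrip PySem.Chars.lstrip
  rw [List.reverse_eq_nil_iff, List.dropWhile_eq_nil_iff]
  simp only [List.mem_reverse]
  exact pv_all_dropWhile _

lemma pvGeoAB (d : Int) (cs : List Char) : pvGeoA d cs = pvGeoB d cs := by
  induction cs using List.reverseRecOn with
  | nil =>
      rw [pvGeoA, pvGeoB]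
      simp [PySem.Chars.strip, PySem.Chars.lstrip, PySem.Chars.rstrip]
  | append_singleton init last ih =>
      rw [pvGeoA, pvGeoB]
      by_cases hb : PySem.Chars.strip (init ++ [last]) = []
      · simp [hb]
      · simp only [hb, dif_neg, if_neg, not_false_iff,
          List.getLastD_concat, List.dropLast_concat, List.length_append,
          List.length_singleton, List.reverse_append, List.reverse_singleton,
          List.singleton_append]
        by_cases hmem : last ∈ pvBd d
        · -- border case: A recurses on init, B's scan passes over `last`
          have hpt : (fun x => decide (x ∈ pvBd d)) last = true := by simp [hmem]
          rw [show List.takeWhile (fun x => decide (x ∈ pvBd d)) (last :: init.reverse)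
                = last :: List.takeWhile (fun x => decide (x ∈ pvBd d)) init.reverse from List.takeWhile_cons_of_pos hpt,
             show List.dropWhile (fun x => decide (x ∈ pvBd d)) (last :: init.reverse)
                = List.dropWhile (fun x => decide (x ∈ pvBd d)) init.reverse from List.dropWhile_cons_of_pos hpt]
          simp only [if_pos hmem]
          rw [ih]
          rcases heq : List.dropWhile (fun x => decide (x ∈ pvBd d)) init.reverse with _ | ⟨c, pre⟩
          · -- the whole of init is border chars: B init is blank-guarded to []
            have hBinit : pvGeoB d init = [] := by
              rw [pvGeoB]
              by_cases h0 : PySem.Chars.strip init = []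
              · simp [h0]
              · simp [heq, PySem.Chars.strip, PySem.Chars.lstrip, PySem.Chars.rstrip]
            rw [hBinit]
            simp only [List.reverse_nil]
            have hsn : PySem.Chars.strip ([] : List Char) = [] := by
              simp [PySem.Chars.strip, PySem.Chars.lstrip, PySem.Chars.rstrip]
            rw [if_pos hsn, if_pos]
            rcases Decidable.em (init.length + 1 = 1) with h1 | h1
            · exact Or.inl ⟨hmem, h1⟩
            · exact Or.inr ⟨h1, trivial⟩
          · -- scan stops at c
            have hrev : (c :: pre).reverse = pre.reverse ++ [c] := by simp
            by_cases hrb : PySem.Chars.strip (pre.reverse ++ [c]) = []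
            · -- prefix up to c is blank: every side returns []
              have hBinit : pvGeoB d init = [] := by
                rw [pvGeoB]
                by_cases h0 : PySem.Chars.strip init = []
                · simp [h0]
                · rw [if_neg h0, heq]
                  dsimp only
                  rw [hrev, if_pos hrb]
              dsimp only
              rw [hBinit, hrev, if_pos hrb, if_pos]
              rcases Decidable.em (init.length + 1 = 1) with h1 | h1
              · exact Or.inl ⟨hmem, h1⟩
              · exact Or.inr ⟨h1, rfl⟩
            · -- generic case: A = B init ++ [nb last]
              have hinit : ¬ PySem.Chars.strip init = [] := by
                intro h0
                apply hrb
                rw [pv_strip_nil_iff] at h0 ⊢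
                intro x hx
                apply h0
                have hx2 : x ∈ c :: pre := by
                  rcases List.mem_append.1 hx with h | h
                  · exact List.mem_cons_of_mem _ (List.mem_reverse.1 h)
                  · simp at h; simp [h]
                have hx3 : x ∈ List.dropWhile (fun x => decide (x ∈ pvBd d)) init.reverse := by
                  rw [heq]; exact hx2
                exact List.mem_reverse.1 ((List.dropWhile_sublist _).subset hx3)
              have hBinit : pvGeoB d init =
                  pre.reverse ++ ((c :: (List.takeWhile (fun x => decide (x ∈ pvBd d)) init.reverse).reverse).map (pvNb d)) := by
                rw [pvGeoB, if_neg hinit, heq]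
                dsimp only
                rw [hrev, if_neg hrb]
              dsimp only
              rw [hBinit, hrev, if_neg hrb]
              have hz : pre.reverse ++ ((c :: (List.takeWhile (fun x => decide (x ∈ pvBd d)) init.reverse).reverse).map (pvNb d)) ≠ [] := by
                simp
              rw [if_neg]
              · simp
              · rintro (⟨_, h1⟩ | ⟨h1, h2⟩)
                · cases init with
                  | nil => simp at heq
                  | cons a t => simp [List.length_cons] at h1
                · exact hz h2
        · -- non-border case: A rewrites only the last char, B's scan stops immediately
          have hpf : ¬ (fun x => decide (x ∈ pvBd d)) last = true := by simp [hmem]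
          rw [show List.takeWhile (fun x => decide (x ∈ pvBd d)) (last :: init.reverse) = [] from List.takeWhile_cons_of_neg hpf,
             show List.dropWhile (fun x => decide (x ∈ pvBd d)) (last :: init.reverse)
                = last :: init.reverse from List.dropWhile_cons_of_neg hpf]
          have hne : ¬ PySem.Chars.strip ((last :: init.reverse).reverse) = [] := by
            simp only [List.reverse_cons, List.reverse_reverse]
            exact hb
          simp only [List.reverse_cons, List.reverse_reverse] at hne ⊢
          simp only [if_neg hmem]
          rw [if_neg hne]
          have hfalse : ¬ ((last ∈ pvBd d ∧ init.length + 1 = 1) ∨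
              (init.length + 1 ≠ 1 ∧ init = [])) := by
            rintro (⟨h, _⟩ | ⟨h1, h2⟩)
            · exact hmem h
            · subst h2; simp at h1
          rw [if_neg hfalse]
          simp

-- ===== VERDICT (by name: the statement is the Claim_ definition above) =====
theorem geo_neighbors_search_py_spec : Claim_equal_geo_neighbors_search_py := by
  intro geo_code direction _ _
  unfold Spec_geo_neighbors_search_py geo_neighbors_search_py geo_neighbors_search_py_alt
  rw [pvGeoAB]
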